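-- pv_equiv track=rewrite | github.com/praveen230701244/smart-expense-backend | services/budget_engine.py | _bucket_for_category
-- ===== SOURCE A (Python) =====
-- _NEED_HINTS = (
--     "food",
--     "grocer",
--     "rent",
--     "util",
--     "bill",
--     "transport",
--     "health",
--     "medical",
--     "insurance",
--     "fuel",
--     "gas",
--     "home",
--     "housing",
--     "education",
--     "school",
--     "loan",
--     "emi",
-- )
--
-- _WANT_HINTS = (
--     "entertain",
--     "shop",
--     "travel",
--     "movie",
--     "game",
--     "subscription",
--     "dining",
--     "restaurant",
--     "luxury",
--     "hobby",
--     "gift",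
--     "fashion",
-- )
--
-- def _bucket_for_category(name: str) -> str:
--     n = (name or "").lower()
--     for h in _NEED_HINTS:
--         if h in n:
--             return "needs"
--     for h in _WANT_HINTS:
--         if h in n:
--             return "wants"
--     return "mixed"
-- ===== SOURCE B (Python) =====
-- _NEED_HINTS = (
--     "food", "grocer", "rent", "util", "bill", "transport", "health",
--     "medical", "insurance", "fuel", "gas", "home", "housing",
--     "education", "school", "loan", "emi",
-- )
--
-- _WANT_HINTS = (
--     "entertain", "shop", "travel", "movie", "game", "subscription",
--     "dining", "restaurant", "luxury", "hobby", "gift", "fashion",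
-- )
--
--
-- def _bucket_for_category(name: str) -> str:
--     # Single position-major scan: walk every suffix of the lowered name once,
--     # testing hint prefixes at that position, instead of one substring search
--     # per hint.  Needs-priority is kept via the early return / want flag.
--     n = (name or "").lower()
--     want = False
--     for i in range(len(n) + 1):
--         tail = n[i:]
--         if any(tail.startswith(h) for h in _NEED_HINTS):
--             return "needs"
--         if not want and any(tail.startswith(h) for h in _WANT_HINTS):
--             want = True
--     return "wants" if want else "mixed"
-- ===== Notes on version B (the rewrite author's own statement) =====
-- stated objective: alternative
-- what changed: Replaced A's hint-major loops (one substring search 'h in n' per hint, needs bucket then wants bucket) by a single position-major scan over the suffixes of the lowered name that tests hint prefixes at each position, keeping needs-priority via an early return and a want flag.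
import Mathlib
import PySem

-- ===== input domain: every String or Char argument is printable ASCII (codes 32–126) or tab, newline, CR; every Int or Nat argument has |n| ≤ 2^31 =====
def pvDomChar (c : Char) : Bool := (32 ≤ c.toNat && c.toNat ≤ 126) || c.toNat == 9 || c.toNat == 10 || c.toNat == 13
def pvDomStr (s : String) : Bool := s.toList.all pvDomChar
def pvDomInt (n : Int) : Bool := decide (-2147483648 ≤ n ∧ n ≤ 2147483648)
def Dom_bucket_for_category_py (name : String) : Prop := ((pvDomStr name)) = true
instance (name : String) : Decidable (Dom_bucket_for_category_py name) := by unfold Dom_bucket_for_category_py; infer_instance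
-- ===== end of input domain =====

-- B replaces A's hint-major substring searches by a single position-major scan over the
-- suffixes of the lowered name, testing hint prefixes at each position (objective: alternative).

def pvNeedHints : List (List Char) :=
  ["food".toList, "grocer".toList, "rent".toList, "util".toList, "bill".toList,
   "transport".toList, "health".toList, "medical".toList, "insurance".toList,
   "fuel".toList, "gas".toList, "home".toList, "housing".toList, "education".toList,
   "school".toList, "loan".toList, "emi".toList]

def pvWantHints : List (List Char) :=
  ["entertain".toList, "shop".toList, "travel".toList, "movie".toList, "game".toList,
   "subscription".toList, "dining".toList, "restaurant".toList, "luxury".toList,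
   "hobby".toList, "gift".toList, "fashion".toList]

-- ===== PORT A =====
-- A's 'for h in HINTS: if h in n: return <label>' loop, one bucket at a time
def pvScanHints (hints : List (List Char)) (n : List Char) : Bool :=
  match hints with
  | [] => false
  | h :: t => if PySem.Chars.isIn h n then true else pvScanHints t n

def bucket_for_category_py (name : String) : String :=
  let n := PySem.Chars.lower (if name == "" then "" else name).toList
  if pvScanHints pvNeedHints n then "needs"
  else if pvScanHints pvWantHints n then "wants"
  else "mixed"

-- ===== PORT B =====
-- any(tail.startswith(h) for h in hints)
def pvHitAt (hints : List (List Char)) (tail : List Char) : Bool :=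
  hints.any (fun h => PySem.Chars.startswith tail h)

-- B's 'for i in range(len(n)+1)' loop over the suffixes n[i:], with the want flag
def pvScanB (tail : List Char) (want : Bool) : String :=
  if pvHitAt pvNeedHints tail then "needs"
  else
    let want' := want || pvHitAt pvWantHints tail
    match tail with
    | [] => if want' then "wants" else "mixed"
    | _ :: t => pvScanB t want'

def bucket_for_category_py_alt (name : String) : String :=
  let n := PySem.Chars.lower (if name == "" then "" else name).toList
  pvScanB n false

-- ===== PRECONDITION & SPEC =====
def Spec_bucket_for_category_py (name : String) (out : String) : Prop := out = bucket_for_category_py_alt name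
instance (name : String) (out : String) : Decidable (Spec_bucket_for_category_py name out) := by unfold Spec_bucket_for_category_py; infer_instance

-- ===== CLAIM (what is proved, stated in full; the proofs are below) =====
def Claim_equal_bucket_for_category_py : Prop := ∀ (name : String), Dom_bucket_for_category_py name → Spec_bucket_for_category_py name (bucket_for_category_py name)

-- ===== LEMMAS AND PROOFS =====

-- 'any hint occurs somewhere in n', the condition both programs decide
def pvAnyHit (hints : List (List Char)) (n : List Char) : Bool :=
  hints.any (fun h => PySem.Chars.isIn h n)

theorem pvScanHints_eq_anyHit (hints : List (List Char)) (n : List Char) :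
    pvScanHints hints n = pvAnyHit hints n := by
  induction hints with
  | nil => simp [pvScanHints, pvAnyHit]
  | cons h t ih =>
      simp only [pvScanHints, pvAnyHit, List.any_cons]
      by_cases hc : PySem.Chars.isIn h n = true
      · simp [hc]
      · simp [hc, ih, pvAnyHit]

theorem pvAnyHit_nil (hints : List (List Char)) :
    pvAnyHit hints [] = pvHitAt hints [] := by
  rw [Bool.eq_iff_iff]
  simp [pvAnyHit, pvHitAt, PySem.Chars.isIn_iff_infix, PySem.Chars.startswith_iff]

theorem pvAnyHit_cons (hints : List (List Char)) (c : Char) (t : List Char) :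
    pvAnyHit hints (c :: t) = (pvHitAt hints (c :: t) || pvAnyHit hints t) := by
  rw [Bool.eq_iff_iff]
  simp only [pvAnyHit, pvHitAt, List.any_eq_true, Bool.or_eq_true,
    PySem.Chars.isIn_iff_infix, PySem.Chars.startswith_iff, List.infix_cons_iff]
  constructor
  · rintro ⟨h, hm, hp | hi⟩
    · exact Or.inl ⟨h, hm, hp⟩
    · exact Or.inr ⟨h, hm, hi⟩
  · rintro (⟨h, hm, hp⟩ | ⟨h, hm, hi⟩)
    · exact ⟨h, hm, Or.inl hp⟩
    · exact ⟨h, hm, Or.inr hi⟩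

theorem pvScanB_eq (tail : List Char) (want : Bool) :
    pvScanB tail want =
      (if pvAnyHit pvNeedHints tail then "needs"
       else if want || pvAnyHit pvWantHints tail then "wants" else "mixed") := by
  induction tail generalizing want with
  | nil =>
      simp only [pvScanB, pvAnyHit_nil]
  | cons c t ih =>
      conv_lhs => rw [pvScanB]
      by_cases hA : pvHitAt pvNeedHints (c :: t) = true
      · rw [if_pos hA, pvAnyHit_cons, hA]
        simp
      · rw [if_neg (by simpa using hA)]
        show pvScanB t (want || pvHitAt pvWantHints (c :: t)) = _
        rw [ih, pvAnyHit_cons pvNeedHints,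
          pvAnyHit_cons pvWantHints]
        simp only [Bool.not_eq_true] at hA
        rw [hA]
        simp [Bool.or_assoc]

-- ===== VERDICT (by name: the statement is the Claim_ definition above) =====
theorem bucket_for_category_py_spec : Claim_equal_bucket_for_category_py := by
  intro name _
  unfold Spec_bucket_for_category_py bucket_for_category_py bucket_for_category_py_alt
  rw [pvScanB_eq]
  simp [pvScanHints_eq_anyHit]
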